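-- pv_equiv track=rewrite | github.com/BBN-E/nlplingo | nlplingo/text/text_span.py | _get_space_token_offset
-- ===== SOURCE A (Python) =====
-- def _get_space_token_offset(text, text_start):
--     """ Given a sentence text, split on empty spaces, to return list of token character offsets
--     :type text: str
--     :type text_start: int
--     :rtype: list[(int,int, str)]
--     """
--     start = text_start
--     tokens = text.split(' ')    # we use this instead of text.split(), to ensure we get empty tokens for consecutive spaces in text
--     offsets = []
--
--     for token in tokens:
--         if len(token) == 0:
--             start += 1
--             continue
--         end = start + len(token)
--         offsets.append((start, end, token))
--         start = end + 1
--
--     return offsets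
-- ===== SOURCE B (Python) =====
-- def _get_space_token_offset(text, text_start):
--     """Single position-based scan: locate each maximal run of non-space chars directly."""
--     offsets = []
--     i, n = 0, len(text)
--     while i < n:
--         if text[i] == ' ':
--             i += 1
--             continue
--         j = i
--         while j < n and text[j] != ' ':
--             j += 1
--         offsets.append((text_start + i, text_start + j, text[i:j]))
--         i = j
--     return offsets
-- ===== Notes on version B (the rewrite author's own statement) =====
-- stated objective: simpler
-- what changed: B replaces split(' ') plus a running-offset accumulator (with an empty-token-skip branch) by one direct index scan over the text that locates each maximal non-space run and emits its offsets from the positions themselves.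
import Mathlib
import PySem

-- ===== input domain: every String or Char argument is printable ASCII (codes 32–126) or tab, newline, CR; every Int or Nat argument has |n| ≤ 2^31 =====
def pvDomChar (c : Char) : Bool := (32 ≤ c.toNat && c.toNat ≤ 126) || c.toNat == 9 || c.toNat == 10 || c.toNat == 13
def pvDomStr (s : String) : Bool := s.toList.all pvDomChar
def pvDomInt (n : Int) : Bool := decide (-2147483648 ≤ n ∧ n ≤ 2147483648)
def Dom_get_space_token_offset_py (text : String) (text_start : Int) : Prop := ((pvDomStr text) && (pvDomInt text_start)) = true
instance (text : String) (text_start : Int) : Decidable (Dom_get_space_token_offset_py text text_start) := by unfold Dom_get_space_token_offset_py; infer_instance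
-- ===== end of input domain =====

-- B replaces split-plus-running-offset by a direct position scan over the characters; objective: simpler.

-- ===== PORT A =====
-- A: split on ' ' (keeping empty tokens), then a loop carrying a running start offset.
def get_space_token_offset_py (text : String) (text_start : Int) : List (Int × Int × String) :=
  let tokens := PySem.Chars.splitOn text.toList [' ']
  (tokens.foldl
    (fun (st : Int × List (Int × Int × String)) token =>
      if token.length = 0 then (st.1 + 1, st.2)
      else (st.1 + (token.length : Int) + 1,
            st.2 ++ [(st.1, st.1 + (token.length : Int), String.ofList token)]))
    (text_start, [])).2

-- ===== PORT B =====
-- B: scan the character list, skipping spaces and taking each maximal non-space run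
-- (the inner `while j < n and text[j] != ' '` scan is the takeWhile/dropWhile pair).
def pvScanB (cs : List Char) (pos : Int) : List (Int × Int × String) :=
  match cs with
  | [] => []
  | c :: rest =>
    if hc : c = ' ' then pvScanB rest (pos + 1)
    else
      let run := (c :: rest).takeWhile (fun x => x != ' ')
      (pos, pos + (run.length : Int), String.ofList run) ::
        pvScanB ((c :: rest).dropWhile (fun x => x != ' ')) (pos + (run.length : Int))
termination_by cs.length
decreasing_by
  · simp
  · simp [hc]
    exact List.length_dropWhile_le _ _

def get_space_token_offset_py_alt (text : String) (text_start : Int) : List (Int × Int × String) :=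
  pvScanB text.toList text_start

-- ===== PRECONDITION & SPEC =====
def Spec_get_space_token_offset_py (text : String) (text_start : Int) (out : List (Int × Int × String)) : Prop := out = get_space_token_offset_py_alt text text_start
instance (text : String) (text_start : Int) (out : List (Int × Int × String)) : Decidable (Spec_get_space_token_offset_py text text_start out) := by unfold Spec_get_space_token_offset_py; infer_instance

-- ===== CLAIM (what is proved, stated in full; the proofs are below) =====
def Claim_equal_get_space_token_offset_py : Prop := ∀ (text : String) (text_start : Int), Dom_get_space_token_offset_py text text_start → Spec_get_space_token_offset_py text text_start (get_space_token_offset_py text text_start)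

-- ===== LEMMAS AND PROOFS =====

-- A's loop as a structural recursion (cons form of the foldl-with-append accumulator).
def pvALoop (ts : List (List Char)) (start : Int) : List (Int × Int × String) :=
  match ts with
  | [] => []
  | t :: ts' =>
    if t.length = 0 then pvALoop ts' (start + 1)
    else (start, start + (t.length : Int), String.ofList t) :: pvALoop ts' (start + (t.length : Int) + 1)

lemma pvFoldl_eq_aLoop (ts : List (List Char)) (start : Int) (acc : List (Int × Int × String)) :
    (ts.foldl
      (fun (st : Int × List (Int × Int × String)) token =>
        if token.length = 0 then (st.1 + 1, st.2)
        else (st.1 + (token.length : Int) + 1,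
              st.2 ++ [(st.1, st.1 + (token.length : Int), String.ofList token)]))
      (start, acc)).2 = acc ++ pvALoop ts start := by
  induction ts generalizing start acc with
  | nil => simp [pvALoop]
  | cons t ts ih =>
    simp only [List.foldl_cons]
    by_cases h : t.length = 0
    · rw [if_pos h, ih, pvALoop]
      rw [if_pos h]
    · rw [if_neg h, ih, pvALoop]
      rw [if_neg h]
      simp

-- PySem.Chars.splitOn with the one-char separator [' '] is List.splitOnP (· == ' ').
lemma pvGo_spec (l : List Char) (fuel : Nat) (cur : List Char) (acc : List (List Char))
    (h : l.length < fuel) :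
    PySem.Chars.splitOn.go [' '] fuel l cur acc =
      acc.reverse ++ (l.splitOnP (· == ' ')).modifyHead (fun hd => cur.reverse ++ hd) := by
  induction l generalizing fuel cur acc with
  | nil =>
    cases fuel with
    | zero => omega
    | succ fuel => simp [PySem.Chars.splitOn.go, List.splitOnP_nil]
  | cons c rest ih =>
    cases fuel with
    | zero => omega
    | succ fuel =>
      rw [PySem.Chars.splitOn.go]
      simp only [List.length_cons] at h
      by_cases hc : c = ' '
      · subst hc
        rw [if_pos (by simp [List.isPrefixOf])]
        have hdrop : List.drop [' '].length (' ' :: rest) = rest := by simp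
        rw [hdrop, ih _ [] _ (by omega)]
        simp only [List.splitOnP_cons, if_pos (by simp : ((' ' == ' ') = true))]
        cases List.splitOnP (fun x => x == ' ') rest <;> simp [List.modifyHead]
      · rw [if_neg (by simp [List.isPrefixOf]; exact fun hh => (hc hh.symm).elim)]
        rw [ih _ (c :: cur) _ (by omega)]
        rw [List.splitOnP_cons, if_neg (by simp [hc])]
        rcases hx : rest.splitOnP (fun x => x == ' ') with _ | ⟨hd, tl⟩
        · exact absurd hx (List.splitOnP_ne_nil _ rest)
        · simp [List.modifyHead]

lemma pvSplitOn_eq (cs : List Char) :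
    PySem.Chars.splitOn cs [' '] = cs.splitOnP (· == ' ') := by
  rw [PySem.Chars.splitOn, pvGo_spec cs (cs.length + 1) [] [] (by omega)]
  rcases List.splitOnP_ne_nil (fun x => x == ' ') cs with hne
  rcases hx : cs.splitOnP (fun x => x == ' ') with _ | ⟨hd, tl⟩
  · exact absurd hx hne
  · simp [List.modifyHead]

-- structure of splitOnP at the first space
lemma pvSplit_struct (cs : List Char) :
    (cs.dropWhile (fun x => x != ' ') = [] ∧ cs.splitOnP (· == ' ') = [cs]) ∨
    (∃ t, cs.dropWhile (fun x => x != ' ') = ' ' :: t ∧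
      cs.splitOnP (· == ' ') = cs.takeWhile (fun x => x != ' ') :: t.splitOnP (· == ' ')) := by
  induction cs with
  | nil => left; exact ⟨rfl, by simp [List.splitOnP_nil]⟩
  | cons c rest ih =>
    by_cases hc : c = ' '
    · subst hc
      right
      exact ⟨rest, by simp, by simp [List.splitOnP_cons]⟩
    · rcases ih with ⟨h1, h2⟩ | ⟨t, h1, h2⟩
      · left
        refine ⟨by simp [hc, h1], ?_⟩
        rw [List.splitOnP_cons, if_neg (by simp [hc]), h2]
        simp [List.modifyHead]
      · right
        refine ⟨t, by simp [hc, h1], ?_⟩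
        rw [List.splitOnP_cons, if_neg (by simp [hc]), h2]
        simp [List.modifyHead, hc]

lemma pvScanB_nil (pos : Int) : pvScanB [] pos = [] := by rw [pvScanB]

lemma pvScanB_space (rest : List Char) (pos : Int) :
    pvScanB (' ' :: rest) pos = pvScanB rest (pos + 1) := by
  rw [pvScanB]; simp

lemma pvScanB_run (c : Char) (rest : List Char) (pos : Int) (hc : c ≠ ' ') :
    pvScanB (c :: rest) pos =
      (pos, pos + ((List.takeWhile (fun x => x != ' ') (c :: rest)).length : Int),
        String.ofList (List.takeWhile (fun x => x != ' ') (c :: rest))) ::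
      pvScanB (List.dropWhile (fun x => x != ' ') (c :: rest))
        (pos + ((List.takeWhile (fun x => x != ' ') (c :: rest)).length : Int)) := by
  rw [pvScanB]; simp [hc]

-- main: A's token loop over splitOnP equals B's position scan
lemma pvMain (n : Nat) : ∀ (cs : List Char) (pos : Int), cs.length ≤ n →
    pvALoop (cs.splitOnP (· == ' ')) pos = pvScanB cs pos := by
  induction n with
  | zero =>
    intro cs pos h
    have : cs = [] := List.eq_nil_of_length_eq_zero (Nat.le_zero.mp h)
    subst this
    simp [List.splitOnP_nil, pvALoop, pvScanB_nil]
  | succ n ih =>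
    intro cs pos h
    match cs with
    | [] => simp [List.splitOnP_nil, pvALoop, pvScanB_nil]
    | c :: rest =>
      by_cases hc : c = ' '
      · subst hc
        rw [List.splitOnP_cons, if_pos (by simp), pvScanB_space]
        rw [← ih rest (pos + 1) (by simp only [List.length_cons] at h; omega)]
        simp [pvALoop]
      · rcases pvSplit_struct (c :: rest) with ⟨h1, h2⟩ | ⟨t, h1, h2⟩
        · -- no space in cs
          have htake : (c :: rest).takeWhile (fun x => x != ' ') = c :: rest := by
            have h3 := List.takeWhile_append_dropWhile (p := fun x => x != ' ') (l := c :: rest)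
            rw [h1, List.append_nil] at h3
            exact h3
          rw [h2, pvScanB_run c rest pos hc, h1, htake, pvScanB_nil]
          simp [pvALoop]
        · -- first space found; t is the remainder after it
          have hlen : rest.length + 1 = ((c :: rest).takeWhile (fun x => x != ' ')).length + 1 + t.length := by
            have h3 := List.takeWhile_append_dropWhile (p := fun x => x != ' ') (l := c :: rest)
            rw [h1] at h3
            have h4 := congrArg List.length h3
            simp at h4
            omega
          have htpos : ((c :: rest).takeWhile (fun x => x != ' ')).length ≥ 1 := by
            rw [List.takeWhile_cons, if_pos (by simp [hc])]
            simp
          rw [h2, pvALoop, if_neg (by omega)]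
          rw [ih t _ (by simp only [List.length_cons] at h; omega)]
          rw [pvScanB_run c rest pos hc, h1, pvScanB_space]

-- ===== VERDICT (by name: the statement is the Claim_ definition above) =====
theorem get_space_token_offset_py_spec : Claim_equal_get_space_token_offset_py := by
  intro text text_start _
  unfold Spec_get_space_token_offset_py get_space_token_offset_py get_space_token_offset_py_alt
  rw [pvSplitOn_eq]
  simp only []
  rw [pvFoldl_eq_aLoop, List.nil_append]
  exact pvMain text.toList.length text.toList text_start le_rfl
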